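-- pv_equiv track=rewrite | github.com/miliar/Code_Jam_Webscraper | solutions_python/Problem_76/674.py | solve
-- ===== SOURCE A (Python) =====
-- def pat_sum(numbers, start, end):
--     sum = numbers[start]
--     for i in range(start+1, end+1):
--         sum = sum^numbers[i]
--     return sum
--
-- def sea_sum(numbers,start, end):
--     sum = numbers[start]
--     for i in range(start+1, end+1):
--         sum = sum+numbers[i]
--     return sum
--
-- def solve(n, numbers):
--     found = False
--     sum_out = 0
--     numbers.sort()
--     for j in range(0,n-1):
--         if pat_sum(numbers,0,j)==pat_sum(numbers,j+1,n-1):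
--             if not found:
--                 sum_out = sea_sum(numbers,j+1,n-1)
--             found = True
--
--     out = ''
--     if not found:
--         out = 'NO'
--     else:
--         out = '%d'%sum_out
--     return out
-- ===== SOURCE B (Python) =====
-- def solve(n, numbers):
--     # A valid split exists iff the XOR of the first n sorted elements is 0,
--     # and then the best (first) split puts only the minimum on Patrick's side.
--     numbers.sort()
--     if n < 2:
--         return 'NO'
--     pre = numbers[:n]
--     x = 0
--     s = 0
--     for v in pre:
--         x ^= v
--         s += v
--     if x == 0:
--         return '%d' % (s - pre[0])
--     return 'NO'
-- ===== Notes on version B (the rewrite author's own statement) =====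
-- stated objective: faster
-- what changed: Replaces the O(n^2) scan over all split points (each recomputing prefix/suffix XORs) by one linear pass: a split with equal XORs exists iff the XOR of all n sorted values is 0, and the first split yields sum minus the minimum.
import Mathlib
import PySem

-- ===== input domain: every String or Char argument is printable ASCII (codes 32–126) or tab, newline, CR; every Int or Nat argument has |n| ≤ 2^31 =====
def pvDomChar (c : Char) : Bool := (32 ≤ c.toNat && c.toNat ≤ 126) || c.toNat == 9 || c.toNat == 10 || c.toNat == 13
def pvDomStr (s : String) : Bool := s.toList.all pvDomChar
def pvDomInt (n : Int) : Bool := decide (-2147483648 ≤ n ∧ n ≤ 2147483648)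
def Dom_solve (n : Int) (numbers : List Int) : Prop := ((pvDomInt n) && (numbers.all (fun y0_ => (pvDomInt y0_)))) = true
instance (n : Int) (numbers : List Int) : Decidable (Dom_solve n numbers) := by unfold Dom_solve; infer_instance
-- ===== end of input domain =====

-- B replaces A's quadratic scan over split points by one linear pass over the sorted prefix
-- (a split with equal XORs exists iff the total XOR is 0; first split = sum minus minimum);
-- like A, the Python B sorts `numbers` in place (same observable mutation).


-- ===== PORT A =====
def patSum (numbers : List Int) (start : Int) (stop : Int) : Int :=
  (PySem.List.pyRange (start + 1) (stop + 1) 1).foldl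
    (fun s i => PySem.Int.bxor s (PySem.List.pyGetD numbers i 0))
    (PySem.List.pyGetD numbers start 0)

def seaSum (numbers : List Int) (start : Int) (stop : Int) : Int :=
  (PySem.List.pyRange (start + 1) (stop + 1) 1).foldl
    (fun s i => s + PySem.List.pyGetD numbers i 0)
    (PySem.List.pyGetD numbers start 0)

def solve (n : Int) (numbers : List Int) : String :=
  let m := PySem.List.sorted numbers (fun x => x) false
  let st := (PySem.List.pyRange 0 (n - 1) 1).foldl
    (fun (st : Bool × Int) j =>
      if patSum m 0 j == patSum m (j + 1) (n - 1) then
        (true, if !st.1 then seaSum m (j + 1) (n - 1) else st.2)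
      else st)
    (false, 0)
  if !st.1 then "NO" else PySem.Int.toStr st.2

-- ===== PORT B =====
def solve_alt (n : Int) (numbers : List Int) : String :=
  let m := PySem.List.sorted numbers (fun x => x) false
  if n < 2 then "NO"
  else
    let pre := PySem.List.slice m none (some n)
    let xs := pre.foldl (fun (p : Int × Int) v => (PySem.Int.bxor p.1 v, p.2 + v)) (0, 0)
    if xs.1 == 0 then PySem.Int.toStr (xs.2 - PySem.List.pyGetD pre 0 0) else "NO"

-- ===== PRECONDITION & SPEC =====
-- Pre_ excludes exactly the inputs where A raises IndexError: 2 ≤ n but fewer than n numbers.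
def Pre_solve (n : Int) (numbers : List Int) : Prop := n ≤ (numbers.length : Int) ∨ n < 2
instance (n : Int) (numbers : List Int) : Decidable (Pre_solve n numbers) := by unfold Pre_solve; infer_instance
def pvWitness_solve : Int × List Int := (2, [3, 3])

def Spec_solve (n : Int) (numbers : List Int) (out : String) : Prop := out = solve_alt n numbers
instance (n : Int) (numbers : List Int) (out : String) : Decidable (Spec_solve n numbers out) := by unfold Spec_solve; infer_instance

-- ===== CLAIM (what is proved, stated in full; the proofs are below) =====
def Claim_equal_solve : Prop := ∀ (n : Int) (numbers : List Int), Dom_solve n numbers → Pre_solve n numbers → Spec_solve n numbers (solve n numbers)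

-- ===== LEMMAS AND PROOFS =====

def pvEnc (s : Bool) (m : Nat) : Int := if s then -(m : Int) - 1 else (m : Int)
lemma pvEnc_repr (a : Int) :
    a = pvEnc (decide (a < 0)) (if a < 0 then (-a - 1).toNat else a.toNat) := by
  by_cases h : a < 0 <;> simp [pvEnc, h] <;> omega
lemma bxor_enc (s t : Bool) (m k : Nat) :
    PySem.Int.bxor (pvEnc s m) (pvEnc t k) = pvEnc (s ^^ t) (m ^^^ k) := by
  cases s <;> cases t <;> simp [pvEnc, PySem.Int.bxor] <;> omega
lemma pv_bxor_assoc (a b c : Int) :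
    PySem.Int.bxor (PySem.Int.bxor a b) c = PySem.Int.bxor a (PySem.Int.bxor b c) := by
  rw [pvEnc_repr a, pvEnc_repr b, pvEnc_repr c]
  rw [bxor_enc, bxor_enc, bxor_enc, bxor_enc, Bool.xor_assoc, Nat.xor_assoc]
lemma pv_bxor_zero_left (a : Int) : PySem.Int.bxor 0 a = a := by
  rw [PySem.Int.bxor_comm, PySem.Int.bxor_zero]
lemma pv_bxor_eq_zero_iff (a b : Int) : PySem.Int.bxor a b = 0 ↔ a = b := by
  constructor
  · intro h
    have := congrArg (PySem.Int.bxor a) h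
    rw [← pv_bxor_assoc, PySem.Int.bxor_self, pv_bxor_zero_left, PySem.Int.bxor_zero] at this
    exact this.symm
  · intro h; rw [h, PySem.Int.bxor_self]
def pvX (l : List Int) : Int := l.foldl PySem.Int.bxor 0
lemma pvX_foldl (l : List Int) : ∀ i : Int, l.foldl PySem.Int.bxor i = PySem.Int.bxor i (pvX l) := by
  induction l with
  | nil => intro i; simp [pvX]
  | cons x t ih =>
    intro i
    simp only [pvX, List.foldl_cons, ih (PySem.Int.bxor i x), ih (PySem.Int.bxor 0 x)]
    rw [pv_bxor_zero_left, pv_bxor_assoc]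
lemma pvX_append (u v : List Int) : pvX (u ++ v) = PySem.Int.bxor (pvX u) (pvX v) := by
  simp only [pvX, List.foldl_append]
  rw [← pvX, pvX_foldl]
  rfl
lemma pvFold (m : List Int) (f : Int → Int → Int) :
    ∀ (c a : Nat) (init : Int), a + c ≤ m.length →
      (PySem.List.pyRange (a : Int) ((a : Int) + (c : Int)) 1).foldl
          (fun s i => f s (PySem.List.pyGetD m i 0)) init
        = ((m.drop a).take c).foldl f init := by
  intro c
  induction c with
  | zero =>
    intro a init _
    rw [PySem.List.pyRange_one_eq_nil (by omega)]
    simp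
  | succ c ih =>
    intro a init h
    rw [PySem.List.pyRange_one_cons (by push_cast; omega)]
    have ha : a < m.length := by omega
    rw [List.foldl_cons, List.drop_eq_getElem_cons ha, List.take_succ_cons, List.foldl_cons]
    rw [PySem.List.pyGetD_ofNat m a 0 ha]
    have : ((a : Int) + 1) = ((a + 1 : Nat) : Int) := by push_cast; ring
    rw [this, show (a : Int) + ((c + 1 : Nat) : Int) = ((a + 1 : Nat) : Int) + (c : Nat) by push_cast; ring]
    exact ih (a + 1) (f init m[a]) (by omega)
lemma patSum_eq (m : List Int) (a c : Nat) (h : a + c + 1 ≤ m.length) :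
    patSum m (a : Int) ((a : Int) + (c : Int)) = pvX ((m.drop a).take (c + 1)) := by
  have ha : a < m.length := by omega
  unfold patSum
  rw [show ((a : Int) + 1) = ((a + 1 : Nat) : Int) by push_cast; ring,
      show ((a : Int) + (c : Nat) + 1) = ((a + 1 : Nat) : Int) + (c : Nat) by push_cast; ring]
  rw [pvFold m _ c (a + 1) _ (by omega)]
  rw [PySem.List.pyGetD_ofNat m a 0 ha]
  rw [List.drop_eq_getElem_cons ha, List.take_succ_cons]
  rw [pvX, List.foldl_cons, pv_bxor_zero_left]
lemma seaSum_eq (m : List Int) (a c : Nat) (h : a + c + 1 ≤ m.length) :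
    seaSum m (a : Int) ((a : Int) + (c : Int)) = ((m.drop a).take (c + 1)).sum := by
  have ha : a < m.length := by omega
  unfold seaSum
  rw [show ((a : Int) + 1) = ((a + 1 : Nat) : Int) by push_cast; ring,
      show ((a : Int) + (c : Nat) + 1) = ((a + 1 : Nat) : Int) + (c : Nat) by push_cast; ring]
  rw [pvFold m _ c (a + 1) _ (by omega)]
  rw [PySem.List.pyGetD_ofNat m a 0 ha]
  rw [List.drop_eq_getElem_cons ha, List.take_succ_cons]
  rw [PySem.List.foldl_add _ (fun x => x)]
  simp
lemma cond_iff (m : List Int) (N k : Nat) (h2 : 2 ≤ N) (hL : N ≤ m.length) (hk : k < N - 1) :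
    (patSum m 0 (k : Int) = patSum m ((k : Int) + 1) ((N : Int) - 1)) ↔ pvX (m.take N) = 0 := by
  have e1 : patSum m 0 (k : Int) = pvX (m.take (k + 1)) := by
    have := patSum_eq m 0 k (by omega)
    simpa using this
  have e2 : patSum m ((k : Int) + 1) ((N : Int) - 1) = pvX ((m.drop (k + 1)).take (N - k - 1)) := by
    have := patSum_eq m (k + 1) (N - k - 2) (by omega)
    rw [show ((k + 1 : Nat) : Int) + ((N - k - 2 : Nat) : Int) = (N : Int) - 1 by
          push_cast; omega,
        show ((k + 1 : Nat) : Int) = (k : Int) + 1 by push_cast; ring] at this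
    rw [this, show N - k - 2 + 1 = N - k - 1 by omega]
  have e3 : m.take N = m.take (k + 1) ++ (m.drop (k + 1)).take (N - k - 1) := by
    rw [← List.take_add, show (k + 1) + (N - k - 1) = N by omega]
  rw [e1, e2, e3, pvX_append, ← pv_bxor_eq_zero_iff]
lemma loop_true (cond : Int → Bool) (g : Int → Int) (l : List Int) (v : Int) :
    l.foldl
        (fun (st : Bool × Int) j =>
          if cond j then (true, if !st.1 then g j else st.2) else st)
        (true, v) = (true, v) := by
  induction l with
  | nil => rfl
  | cons x t ih =>
    simp only [List.foldl_cons]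
    by_cases hx : cond x = true
    · rw [if_pos hx]; exact ih
    · rw [if_neg hx]; exact ih
lemma loop_false (cond : Int → Bool) (g : Int → Int) (l : List Int)
    (h : ∀ j ∈ l, cond j = false) (st : Bool × Int) :
    l.foldl
        (fun (st : Bool × Int) j =>
          if cond j then (true, if !st.1 then g j else st.2) else st)
        st = st := by
  induction l generalizing st with
  | nil => rfl
  | cons x t ih =>
    simp only [List.foldl_cons, h x (by simp)]
    exact ih (fun j hj => h j (by simp [hj])) st
theorem pv_main (n : Int) (numbers : List Int)
    (hpre : Pre_solve n numbers) : solve n numbers = solve_alt n numbers := by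
  unfold Pre_solve at hpre
  unfold solve solve_alt
  by_cases h2 : n < 2
  · rw [PySem.List.pyRange_one_eq_nil (by omega)]
    simp [h2]
  · have hn2 : 2 ≤ n := by omega
    have hlen : n ≤ (numbers.length : Int) := by rcases hpre with h | h; exact h; omega
    set m := PySem.List.sorted numbers (fun x => x) false with hm
    have hmlen : m.length = numbers.length := PySem.List.length_sorted numbers _ false
    lift n to ℕ using (by omega) with N
    have hN2 : 2 ≤ N := by exact_mod_cast hn2
    have hNL : N ≤ m.length := by omega
    have h0 : 0 < m.length := by omega
    rw [if_neg h2, PySem.List.slice_to m (by omega)]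
    simp only [Int.toNat_natCast]
    rw [PySem.List.foldl_prod_mk]
    have hsum : List.foldl (fun p v => p + v) 0 (m.take N) = (m.take N).sum := by
      rw [PySem.List.foldl_add _ (fun x => x)]; simp
    have hx : List.foldl PySem.Int.bxor 0 (m.take N) = pvX (m.take N) := rfl
    -- decomposition of the prefix
    have hdrop0 : m.take N = m[0] :: (m.drop 1).take (N - 1) := by
      rw [show N = 1 + (N - 1) by omega, List.take_add]
      rw [show m.take 1 = [m[0]] by
        conv_lhs => rw [show m = m[0] :: m.drop 1 by simpa using List.drop_eq_getElem_cons h0]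
        simp]
      simp [show 1 + (N - 1) - 1 = N - 1 by omega]
    by_cases hC : pvX (m.take N) = 0
    · -- a split exists: A finds it at j = 0
      rw [PySem.List.pyRange_one_cons (by omega)]
      rw [List.foldl_cons]
      have hc0 : (patSum m 0 0 == patSum m (0 + 1) ((N : Int) - 1)) = true := by
        rw [beq_iff_eq]
        have := (cond_iff m N 0 hN2 hNL (by omega)).mpr hC
        simpa using this
      have hsea : seaSum m (0 + 1) ((N : Int) - 1) = ((m.drop 1).take (N - 1)).sum := by
        have := seaSum_eq m 1 (N - 2) (by omega)
        rw [show ((1 : Nat) : Int) + ((N - 2 : Nat) : Int) = (N : Int) - 1 by push_cast; omega] at this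
        simpa [show N - 2 + 1 = N - 1 by omega] using this
      rw [if_pos hc0, loop_true, hx, hsum]
      rw [if_pos (show (pvX (List.take N m) == 0) = true by rwa [beq_iff_eq])]
      show PySem.Int.toStr (seaSum m (0 + 1) ((N : Int) - 1))
        = PySem.Int.toStr ((List.take N m).sum - PySem.List.pyGetD (List.take N m) 0 0)
      rw [hsea, hdrop0, PySem.List.pyGetD_zero_cons, List.sum_cons]
      congr 1
      ring
    · -- no split: every condition in A's loop is false
      rw [loop_false _ (fun j => seaSum m (j + 1) ((N : Int) - 1)) _ ?_ (false, 0)]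
      · rw [hx, if_neg (show ¬((pvX (List.take N m) == 0) = true) from by
          simp only [beq_iff_eq]
          exact hC)]
        rfl
      · intro j hj
        rw [PySem.List.mem_pyRange_one] at hj
        obtain ⟨hj0, hj1⟩ := hj
        lift j to ℕ using hj0 with k
        rw [beq_eq_false_iff_ne]
        intro hEq
        exact hC ((cond_iff m N k hN2 hNL (by omega)).mp hEq)

-- ===== VERDICT (by name: the statement is the Claim_ definition above) =====
theorem solve_spec : Claim_equal_solve := by
  intro n numbers _ hpre
  unfold Spec_solve
  exact pv_main n numbers hpre
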